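-- pv_equiv track=rewrite | github.com/jangjichang/Today-I-Learn | Algorithm/Programmers/kakao5.py | makeUnion
-- ===== SOURCE A (Python) =====
-- import copy
--
-- def makeUnion(input1, input2, input3):
--     new_input1 = copy.deepcopy(input1)
--     new_input2 = copy.deepcopy(input2)
--     new_input3 = copy.deepcopy(input3)
--     new_input1.extend(new_input2)
--
--     for i in new_input3:
--         new_input1.remove(i)
--     return new_input1
-- ===== SOURCE B (Python) =====
-- def makeUnion(input1, input2, input3):
--     need = {}
--     for x in input3:
--         need[x] = need.get(x, 0) + 1
--     out = []
--     for x in input1 + input2: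
--         k = need.get(x, 0)
--         if k > 0:
--             need[x] = k - 1
--         else:
--             out.append(x)
--     return out
-- ===== Notes on version B (the rewrite author's own statement) =====
-- stated objective: faster
-- what changed: B builds a value->pending-removal-count dict from input3 once and does a single filtering pass over input1+input2, instead of calling list.remove (a linear scan) once per element of input3.
import Mathlib
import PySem

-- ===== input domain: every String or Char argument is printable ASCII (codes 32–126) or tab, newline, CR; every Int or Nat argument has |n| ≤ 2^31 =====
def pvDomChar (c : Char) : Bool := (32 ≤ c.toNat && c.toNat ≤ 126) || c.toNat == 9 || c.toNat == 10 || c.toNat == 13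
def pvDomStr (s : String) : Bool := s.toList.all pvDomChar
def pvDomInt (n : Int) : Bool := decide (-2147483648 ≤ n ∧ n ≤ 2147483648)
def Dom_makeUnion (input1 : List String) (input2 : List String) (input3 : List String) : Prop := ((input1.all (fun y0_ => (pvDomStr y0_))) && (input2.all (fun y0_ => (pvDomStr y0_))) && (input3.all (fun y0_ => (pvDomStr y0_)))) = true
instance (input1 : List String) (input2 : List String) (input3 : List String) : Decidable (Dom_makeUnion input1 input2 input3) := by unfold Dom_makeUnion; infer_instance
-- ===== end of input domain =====

-- B replaces A's per-element list.remove scans by a value->pending-removal-count dict built once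
-- from input3 and a single filtering pass over input1 ++ input2 (objective: faster, asymptotic).

-- ===== PORT A =====
-- A: concat copies of input1 and input2, then for each i in input3 call list.remove(i)
-- (remove?; under Pre_ it always succeeds, getD never takes its default there).
def makeUnion (input1 : List String) (input2 : List String) (input3 : List String) : List String :=
  let new_input1 := input1 ++ input2
  input3.foldl (fun acc i => (PySem.List.remove? acc i).getD acc) new_input1

-- ===== PORT B =====
def makeUnion_alt (input1 : List String) (input2 : List String) (input3 : List String) : List String :=
  let need : PySem.Dict String Int :=
    input3.foldl (fun d x => d.insert x (d.getD x 0 + 1)) PySem.Dict.empty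
  let res :=
    (input1 ++ input2).foldl
      (fun (s : PySem.Dict String Int × List String) x =>
        let k := s.1.getD x 0
        if 0 < k then (s.1.insert x (k - 1), s.2) else (s.1, s.2 ++ [x]))
      (need, [])
  res.2

-- ===== PRECONDITION & SPEC =====
-- Pre_ excludes exactly the inputs on which A's list.remove raises ValueError:
-- some value occurring more often in input3 than in input1 ++ input2.
def Pre_makeUnion (input1 : List String) (input2 : List String) (input3 : List String) : Prop :=
  ∀ v ∈ input3, input3.count v ≤ (input1 ++ input2).count v
instance (input1 : List String) (input2 : List String) (input3 : List String) : Decidable (Pre_makeUnion input1 input2 input3) := by unfold Pre_makeUnion; infer_instance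

def pvWitness_makeUnion : List String × List String × List String := (["a", "b"], ["c", "a"], ["a", "c"])

def Spec_makeUnion (input1 : List String) (input2 : List String) (input3 : List String) (out : List String) : Prop := out = makeUnion_alt input1 input2 input3
instance (input1 : List String) (input2 : List String) (input3 : List String) (out : List String) : Decidable (Spec_makeUnion input1 input2 input3 out) := by unfold Spec_makeUnion; infer_instance

-- ===== CLAIM (what is proved, stated in full; the proofs are below) =====
def Claim_equal_makeUnion : Prop := ∀ (input1 : List String) (input2 : List String) (input3 : List String), Dom_makeUnion input1 input2 input3 → Pre_makeUnion input1 input2 input3 → Spec_makeUnion input1 input2 input3 (makeUnion input1 input2 input3)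

-- ===== LEMMAS AND PROOFS =====

-- The common functional core: scan the list, dropping an element while its pending count is positive.
def specF : (String → Int) → List String → List String
  | _, [] => []
  | f, x :: xs => if 0 < f x then specF (Function.update f x (f x - 1)) xs else x :: specF f xs

theorem specF_nonpos (f : String → Int) (L : List String) (h : ∀ v, f v ≤ 0) :
    specF f L = L := by
  induction L with
  | nil => rfl
  | cons x xs ih => simp [specF, not_lt.mpr (h x), ih]

theorem specF_bump (L : List String) (f : String → Int) (i : String)
    (hmem : i ∈ L) (hnn : ∀ v, 0 ≤ f v) :
    specF (Function.update f i (f i + 1)) L = specF f (L.erase i) := by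
  induction L generalizing f with
  | nil => cases hmem
  | cons x xs ih =>
    by_cases hx : x = i
    · subst hx
      have hpos : 0 < Function.update f x (f x + 1) x := by
        simp [Function.update_self]; have := hnn x; omega
      have hback : Function.update (Function.update f x (f x + 1)) x
          (Function.update f x (f x + 1) x - 1) = f := by
        funext v
        by_cases hv : v = x
        · subst hv; simp [Function.update_self]
        · simp [Function.update_of_ne hv]
      rw [List.erase_cons_head]
      simp only [specF, if_pos hpos, hback]
    · have hmem' : i ∈ xs := by
        rcases hmem with _ | h
        · exact absurd rfl hx
        · assumption
      have hne : x ≠ i := hx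
      have herase : (x :: xs).erase i = x :: xs.erase i := by
        simp [beq_iff_eq, hne]
      have hfx : Function.update f i (f i + 1) x = f x := Function.update_of_ne hne (f i + 1) f
      by_cases hpos : 0 < f x
      · have hcomm : Function.update (Function.update f i (f i + 1)) x (f x - 1)
            = Function.update (Function.update f x (f x - 1)) i
                (Function.update f x (f x - 1) i + 1) := by
          rw [Function.update_of_ne (Ne.symm hne)]
          exact Function.update_comm (Ne.symm hne) _ _ f
        have hnn' : ∀ v, 0 ≤ Function.update f x (f x - 1) v := by
          intro v
          by_cases hv : v = x
          · subst hv; simp [Function.update_self]; omega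
          · simpa [Function.update_of_ne hv] using hnn v
        simp only [specF, hfx, hpos, if_true, herase]
        rw [hcomm, ih _ hmem' hnn']
      · simp only [specF, hfx, hpos, if_false, herase]
        rw [ih f hmem' hnn]

-- A's fold of remove?s equals the count-based scan whenever every removal can succeed.
theorem foldA_eq_specF (input3 L : List String)
    (h : ∀ v ∈ input3, input3.count v ≤ L.count v) :
    input3.foldl (fun acc i => (PySem.List.remove? acc i).getD acc) L
      = specF (fun v => (input3.count v : Int)) L := by
  induction input3 generalizing L with
  | nil =>
    simp only [List.foldl_nil]
    rw [specF_nonpos _ _ (by intro v; simp)]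
  | cons i rest ih =>
    have hcnt : (i :: rest).count i ≤ L.count i := h i (by simp)
    have hiL : i ∈ L := by
      have : 0 < L.count i := lt_of_lt_of_le (by simp [List.count_cons_self]) hcnt
      exact List.count_pos_iff.mp this
    have hrm : (PySem.List.remove? L i).getD L = L.erase i := by
      rw [PySem.List.remove?_eq_some_erase L i hiL]; rfl
    have hrest : ∀ v ∈ rest, rest.count v ≤ (L.erase i).count v := by
      intro v hv
      by_cases hvi : v = i
      · subst hvi
        have h1 : (v :: rest).count v = rest.count v + 1 := by simp [List.count_cons_self]
        have h2 := h v (by simp)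
        rw [List.count_erase_self]
        omega
      · have := h v (by simp [hv])
        rw [List.count_erase_of_ne hvi]
        simpa [List.count_cons, Ne.symm hvi] using this
    have hupd : (fun v => ((i :: rest).count v : Int))
        = Function.update (fun v => (rest.count v : Int)) i ((rest.count i : Int) + 1) := by
      funext v
      by_cases hv : v = i
      · subst hv; simp [Function.update_self, List.count_cons_self]
      · simp [Function.update_of_ne hv, Ne.symm hv]
    simp only [List.foldl_cons, hrm]
    rw [ih _ hrest, hupd, ← specF_bump _ _ _ hiL (by intro v; positivity)]

-- B's filtering pass equals the count-based scan over whatever dict it carries.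
theorem passB_eq_specF (L : List String) (d : PySem.Dict String Int) (out : List String) :
    (L.foldl
      (fun (s : PySem.Dict String Int × List String) x =>
        let k := s.1.getD x 0
        if 0 < k then (s.1.insert x (k - 1), s.2) else (s.1, s.2 ++ [x]))
      (d, out)).2 = out ++ specF (fun v => d.getD v 0) L := by
  induction L generalizing d out with
  | nil => simp [specF]
  | cons x xs ih =>
    by_cases hpos : 0 < d.getD x 0
    · have hup : (fun v => (d.insert x (d.getD x 0 - 1)).getD v 0)
          = Function.update (fun v => d.getD v 0) x (d.getD x 0 - 1) := by
        funext v
        by_cases hv : v = x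
        · subst hv; simp [Function.update_self]
        · simp [PySem.Dict.getD_insert, hv]
      simp only [List.foldl_cons, hpos, if_true, specF]
      rw [ih, hup]
    · simp only [List.foldl_cons, hpos, if_false, specF]
      rw [ih]
      simp

theorem makeUnion_alt_eq_specF (input1 input2 input3 : List String) :
    makeUnion_alt input1 input2 input3
      = specF (fun v => (input3.count v : Int)) (input1 ++ input2) := by
  unfold makeUnion_alt
  rw [passB_eq_specF]
  have : (fun v => (input3.foldl (fun d x => d.insert x (d.getD x 0 + 1)) PySem.Dict.empty).getD v 0)
      = fun v => (input3.count v : Int) := by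
    funext v
    rw [PySem.Dict.getD_foldl_insert_add_one]
    simp [PySem.Dict.getD_empty]
  rw [this, List.nil_append]

-- ===== VERDICT (by name: the statement is the Claim_ definition above) =====
theorem makeUnion_spec : Claim_equal_makeUnion := by
  intro input1 input2 input3 _ hpre
  unfold Spec_makeUnion makeUnion
  rw [makeUnion_alt_eq_specF]
  exact foldA_eq_specF input3 (input1 ++ input2) hpre
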